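-- pv_equiv track=rewrite | github.com/AdamZhouSE/pythonHomework | Code/CodeRecords/2687/60716/276222.py | binary_T
-- ===== SOURCE A (Python) =====
-- def binary_T(number:int):
--     index = 0
--     temp = 0
--     while True:
--         if temp == number:
--             return True
--         elif temp >number:
--             return False
--         else:
--             if index%2==0:
--                 temp += (2**index)
--                 index += 1
--             else:
--                 index += 1
--                 continue
-- ===== SOURCE B (Python) =====
-- def binary_T(number):
--     # n is a sum 1 + 4 + 16 + ... = (4^k - 1)/3  iff  3*n + 1 is a power of 4.
--     # Divide 3*n+1 down by 4 instead of accumulating partial sums upward.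
--     m = 3 * number + 1
--     while m > 1:
--         if m % 4 != 0:
--             return False
--         m //= 4
--     return m == 1
-- ===== Notes on version B (the rewrite author's own statement) =====
-- stated objective: simpler
-- what changed: Instead of accumulating partial sums 1+4+16+... upward with an index-parity loop until the sum reaches the input, B forms m = 3*number+1 and divides it down by 4, returning True iff it reduces to 1 (i.e. m is a power of 4).
import Mathlib
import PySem

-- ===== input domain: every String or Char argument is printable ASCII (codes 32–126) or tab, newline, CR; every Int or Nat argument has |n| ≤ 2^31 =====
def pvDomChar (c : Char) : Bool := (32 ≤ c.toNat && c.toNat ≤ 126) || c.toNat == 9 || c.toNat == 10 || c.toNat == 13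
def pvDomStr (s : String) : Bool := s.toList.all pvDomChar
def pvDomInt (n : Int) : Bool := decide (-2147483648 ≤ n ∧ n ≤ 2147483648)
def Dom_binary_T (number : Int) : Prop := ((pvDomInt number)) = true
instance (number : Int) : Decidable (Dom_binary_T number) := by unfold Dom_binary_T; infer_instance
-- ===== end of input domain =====

-- B replaces A's upward accumulation of the partial sums 1+4+16+… by dividing m = 3*number+1 down by 4 (simpler).

-- ===== PORT A =====
-- A's while-True loop; `2**index` is ported as `2 ^ index.toNat` (index is an
-- incrementing counter starting at 0, so it is nonnegative in every reachable state).
def binaryLoopA (number index temp : Int) : Bool :=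
  if temp = number then true
  else if temp > number then false
  else if index % 2 = 0 then binaryLoopA number (index + 1) (temp + 2 ^ index.toNat)
  else binaryLoopA number (index + 1) temp
termination_by 2 * (number - temp).toNat + (index % 2).toNat
decreasing_by
  · have h2 : (1:Int) ≤ 2 ^ index.toNat := one_le_pow₀ (by norm_num)
    have : ((index + 1) % 2) = 1 := by omega
    omega
  · have hm : ¬ index % 2 = 0 := by assumption
    have hm2 : index % 2 = 1 := by omega
    have : ((index + 1) % 2) = 0 := by omega
    omega

def binary_T (number : Int) : Bool := binaryLoopA number 0 0

-- ===== PORT B =====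
def pow4Loop (m : Int) : Bool :=
  if 1 < m then
    if PySem.Int.mod m 4 ≠ 0 then false
    else pow4Loop (PySem.Int.floordiv m 4)
  else m == 1
termination_by m.toNat
decreasing_by
  rw [PySem.Int.floordiv_eq_ediv_of_pos (by norm_num)]
  omega

def binary_T_alt (number : Int) : Bool := pow4Loop (3 * number + 1)

-- ===== PRECONDITION & SPEC =====
def Spec_binary_T (number : Int) (out : Bool) : Prop := out = binary_T_alt number
instance (number : Int) (out : Bool) : Decidable (Spec_binary_T number out) := by unfold Spec_binary_T; infer_instance

-- ===== CLAIM (what is proved, stated in full; the proofs are below) =====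
def Claim_equal_binary_T : Prop := ∀ (number : Int), Dom_binary_T number → Spec_binary_T number (binary_T number)

-- ===== LEMMAS AND PROOFS =====

-- partial sums 1 + 4 + … + 4^(k-1), i.e. A's `temp` at index 2k
def psum : Nat → Int
  | 0 => 0
  | k + 1 => 4 * psum k + 1

lemma three_psum (k : Nat) : 3 * psum k + 1 = 4 ^ k := by
  induction k with
  | zero => simp [psum]
  | succ k ih => simp only [psum, pow_succ]; omega

lemma psum_succ' (k : Nat) : psum (k + 1) = psum k + 4 ^ k := by
  have := three_psum k
  simp only [psum]; omega

lemma psum_mono {j k : Nat} (h : j ≤ k) : psum j ≤ psum k := by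
  induction k with
  | zero => simp_all
  | succ k ih =>
    rcases Nat.lt_or_ge j (k + 1) with h' | h'
    · have := psum_succ' k
      have h4 : (0:Int) < 4 ^ k := by positivity
      have := ih (by omega)
      omega
    · have : j = k + 1 := by omega
      simp [this]

-- A's loop from the invariant state (index = 2k, temp = psum k) decides
-- whether number is some partial sum psum j with j ≥ k.
lemma loopA_char (number : Int) (k : Nat) :
    binaryLoopA number (2 * k) (psum k) = true ↔ ∃ j, k ≤ j ∧ number = psum j := by
  by_cases hlt : psum k < number
  case neg =>
    rw [binaryLoopA]
    by_cases he : psum k = number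
    · rw [if_pos he]
      exact iff_of_true rfl ⟨k, le_refl _, he.symm⟩
    · rw [if_neg he, if_pos (by omega : psum k > number)]
      refine iff_of_false (by simp) ?_
      rintro ⟨j, hj, rfl⟩
      have := psum_mono hj; omega
  case pos =>
    generalize hd : (number - psum k).toNat = d
    induction d using Nat.strong_induction_on generalizing k with
    | _ d ih =>
      have hne : psum k ≠ number := by omega
      have hngt : ¬ psum k > number := by omega
      rw [binaryLoopA, if_neg hne, if_neg hngt,
        if_pos (by omega : (2 * (k:Int)) % 2 = 0)]
      have hpow : psum k + 2 ^ ((2:Int) * k).toNat = psum (k + 1) := by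
        have h1 : ((2:Int) * k).toNat = 2 * k := by omega
        rw [h1, pow_mul, show ((2:Int) ^ 2) ^ k = 4 ^ k by norm_num, ← psum_succ']
      rw [hpow]
      -- second unfolding: index 2k+1 is odd, only index advances
      rw [binaryLoopA]
      by_cases he : psum (k + 1) = number
      · rw [if_pos he]
        exact iff_of_true rfl ⟨k + 1, by omega, he.symm⟩
      · rw [if_neg he]
        by_cases hgt : psum (k + 1) > number
        · rw [if_pos hgt]
          refine iff_of_false (by simp) ?_
          rintro ⟨j, hj, rfl⟩
          have hk1 : k + 1 ≤ j := by
            by_contra h'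
            have := psum_mono (show j ≤ k by omega); omega
          have := psum_mono hk1; omega
        · rw [if_neg hgt, if_neg (by omega : ¬ (2 * (k:Int) + 1) % 2 = 0)]
          have hlt' : psum (k + 1) < number := by omega
          have h4 : (0:Int) < 4 ^ k := by positivity
          have hps := psum_succ' k
          have hcast : (2 * (k:Int) + 1 + 1) = 2 * (((k + 1 : Nat)) : Int) := by
            push_cast; ring
          rw [hcast]
          rw [ih (number - psum (k + 1)).toNat (by omega) (k + 1) hlt' rfl]
          constructor
          · rintro ⟨j, hj, hje⟩; exact ⟨j, by omega, hje⟩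
          · rintro ⟨j, hj, rfl⟩
            refine ⟨j, ?_, rfl⟩
            by_contra h'
            have := psum_mono (show j ≤ k by omega); omega

lemma A_char (number : Int) : binary_T number = true ↔ ∃ j : Nat, number = psum j := by
  have h := loopA_char number 0
  rw [show (2 * ((0:Nat):Int)) = 0 by norm_num, show psum 0 = 0 from rfl] at h
  unfold binary_T
  rw [h]
  constructor
  · rintro ⟨j, _, hj⟩; exact ⟨j, hj⟩
  · rintro ⟨j, hj⟩; exact ⟨j, Nat.zero_le _, hj⟩

lemma pow4Loop_char (m : Int) : pow4Loop m = true ↔ ∃ j : Nat, m = 4 ^ j := by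
  by_cases h : 1 < m
  · generalize hd : m.toNat = d
    induction d using Nat.strong_induction_on generalizing m with
    | _ d ih =>
      rw [pow4Loop, if_pos h]
      by_cases hm : PySem.Int.mod m 4 = 0
      · rw [if_neg (not_not_intro hm), PySem.Int.floordiv_eq_ediv_of_pos (by norm_num)]
        rw [PySem.Int.mod_eq_emod_of_pos (by norm_num)] at hm
        obtain ⟨q, rfl⟩ := Int.dvd_of_emod_eq_zero hm
        have hq : 1 ≤ q := by nlinarith
        rw [show (4 * q) / 4 = q by omega]
        have hiter : pow4Loop q = true ↔ ∃ j : Nat, q = 4 ^ j := by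
          by_cases hq1 : 1 < q
          · exact ih q.toNat (by omega) q hq1 rfl
          · have hq1' : q = 1 := by omega
            subst hq1'
            refine iff_of_true ?_ ⟨0, by norm_num⟩
            rw [pow4Loop]
            norm_num
        rw [hiter]
        constructor
        · rintro ⟨j, rfl⟩; exact ⟨j + 1, by ring⟩
        · rintro ⟨j, hj⟩
          match j with
          | 0 => omega
          | j + 1 =>
            refine ⟨j, ?_⟩
            rw [pow_succ] at hj
            nlinarith [hj]
      · rw [if_pos hm]
        refine iff_of_false (by simp) ?_
        rintro ⟨j, rfl⟩
        match j with
        | 0 => omega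
        | j + 1 =>
          exact hm (by
            rw [PySem.Int.mod_eq_emod_of_pos (by norm_num), pow_succ]
            exact Int.mul_emod_left _ 4)
  · rw [pow4Loop, if_neg h]
    constructor
    · intro he
      simp only [beq_iff_eq] at he
      exact ⟨0, by simp [he]⟩
    · rintro ⟨j, rfl⟩
      have : (1:Int) ≤ 4 ^ j := one_le_pow₀ (by norm_num)
      have h1 : (4:Int) ^ j = 1 := by omega
      simp [h1]

lemma B_char (number : Int) : binary_T_alt number = true ↔ ∃ j : Nat, number = psum j := by
  unfold binary_T_alt
  rw [pow4Loop_char]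
  constructor
  · rintro ⟨j, hj⟩
    have := three_psum j
    exact ⟨j, by omega⟩
  · rintro ⟨j, rfl⟩
    exact ⟨j, three_psum j⟩

-- ===== VERDICT (by name: the statement is the Claim_ definition above) =====
theorem binary_T_spec : Claim_equal_binary_T := by
  intro number _
  unfold Spec_binary_T
  rw [Bool.eq_iff_iff, A_char, B_char]
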